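-- pv_equiv track=rewrite | github.com/alexandrasouly/algorithms_course_stanford | course1_week2/same_value_as_index.py | find_value_as_index
-- ===== SOURCE A (Python) =====
-- import math
--
-- def find_value_as_index(starting_index, array):
--     # Starting index shows where in the original array
--     # is our current array starting.
--     # This is helpful to convert what value should match what index.
--
--     # base case
--     if len(array) ==1:
--         if array[0] == starting_index:
--             return True
--         else:
--             return False
--
--     middle = math.floor(len(array)/2)
--     if array[middle] < starting_index+middle:
--         # we discard first half as there can't be any there
--         return find_value_as_index(starting_index+middle, array[middle:])
--     elif array[middle] == starting_index+middle:
--         # yay found it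
--         return True
--     else:
--         # we discard second half as there can't be any there
--         return find_value_as_index(starting_index+middle, array[:middle])
-- ===== SOURCE B (Python) =====
-- def find_value_as_index(starting_index, array):
--     # Iterative index-pointer version of the same divide step: instead of
--     # slicing off new lists, keep (lo, hi) bounds into the original array and a
--     # running start offset, mirroring the recursive calls exactly.
--     lo, hi, s = 0, len(array), starting_index
--     while hi - lo > 1:
--         m = (hi - lo) // 2
--         v = array[lo + m]
--         if v < s + m:
--             s += m
--             lo += m
--         elif v == s + m:
--             return True
--         else:
--             s += m
--             hi = lo + m
--     return array[lo] == s
-- ===== Notes on version B (the rewrite author's own statement) =====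
-- stated objective: alternative
-- what changed: Replaced the recursive version that copies half the list with a slice at every step by an iterative loop that moves (lo, hi) index pointers and a running start offset over the original list, so no list is ever copied.
import Mathlib
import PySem

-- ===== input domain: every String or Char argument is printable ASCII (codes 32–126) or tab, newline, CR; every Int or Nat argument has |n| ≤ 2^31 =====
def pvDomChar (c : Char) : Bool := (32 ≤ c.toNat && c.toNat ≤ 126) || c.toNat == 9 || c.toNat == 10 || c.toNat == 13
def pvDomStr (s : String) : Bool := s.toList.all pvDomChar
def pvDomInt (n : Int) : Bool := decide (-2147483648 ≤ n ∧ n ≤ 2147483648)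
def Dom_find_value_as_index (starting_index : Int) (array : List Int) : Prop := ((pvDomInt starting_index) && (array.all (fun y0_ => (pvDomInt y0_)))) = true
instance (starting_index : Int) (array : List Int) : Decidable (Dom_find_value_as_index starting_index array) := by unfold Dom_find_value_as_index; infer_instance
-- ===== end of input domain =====

-- B replaces A's recursion-with-list-slicing by an iterative (lo,hi) index-pointer
-- loop over the original list (no copying); objective: alternative (not measured faster).


-- ===== PORT A =====
-- Recursive: base case on a one-element slice, otherwise recurse on array[middle:]
-- or array[:middle].  The fuel parameter is only a structural totality guard (the
-- list shrinks at every call, so fuel = array.length never runs out); on the empty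
-- list Python raises IndexError (array[0]), excluded by Pre_, port returns false.
def fvaiRec : Nat → Int → List Int → Bool
  | 0, _, _ => false  -- never reached with fuel = array.length ≥ 1
  | fuel + 1, starting_index, array =>
    if array.length = 1 then
      ((PySem.List.pyGet? array 0).getD 0) == starting_index
    else if array.length = 0 then
      false  -- Python: IndexError (excluded by Pre_)
    else
      let middle : Nat := array.length / 2
      let v := (PySem.List.pyGet? array (middle : Int)).getD 0
      if v < starting_index + middle then
        fvaiRec fuel (starting_index + middle) (PySem.List.slice array (some (middle : Int)) none)
      else if v = starting_index + middle then
        true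
      else
        fvaiRec fuel (starting_index + middle) (PySem.List.slice array none (some (middle : Int)))

def find_value_as_index (starting_index : Int) (array : List Int) : Bool :=
  fvaiRec array.length starting_index array

-- ===== PORT B =====
-- The while loop of Source B: state (s, lo, hi) over the original list, no slicing.
-- The fuel parameter is only a structural totality guard (hi - lo shrinks each
-- iteration, so fuel = array.length never runs out).
def fvaiLoop : Nat → List Int → Int → Nat → Nat → Bool
  | 0, _, _, _, _ => false  -- never reached with fuel = array.length ≥ 1
  | fuel + 1, array, s, lo, hi =>
    if hi - lo ≤ 1 then
      ((PySem.List.pyGet? array (lo : Int)).getD 0) == s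
    else
      let m : Nat := (hi - lo) / 2
      let v := (PySem.List.pyGet? array ((lo + m : Nat) : Int)).getD 0
      if v < s + m then fvaiLoop fuel array (s + m) (lo + m) hi
      else if v = s + m then true
      else fvaiLoop fuel array (s + m) lo (lo + m)

def find_value_as_index_alt (starting_index : Int) (array : List Int) : Bool :=
  fvaiLoop array.length array starting_index 0 array.length

-- ===== PRECONDITION & SPEC =====
-- A raises IndexError on the empty list (array[0] after middle = 0); B raises there too.
def Pre_find_value_as_index (starting_index : Int) (array : List Int) : Prop := array ≠ []
instance (starting_index : Int) (array : List Int) : Decidable (Pre_find_value_as_index starting_index array) := by unfold Pre_find_value_as_index; infer_instance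
def pvWitness_find_value_as_index : Int × List Int := (0, [-3, 1, 5])

def Spec_find_value_as_index (starting_index : Int) (array : List Int) (out : Bool) : Prop := out = find_value_as_index_alt starting_index array
instance (starting_index : Int) (array : List Int) (out : Bool) : Decidable (Spec_find_value_as_index starting_index array out) := by unfold Spec_find_value_as_index; infer_instance

-- ===== CLAIM (what is proved, stated in full; the proofs are below) =====
def Claim_equal_find_value_as_index : Prop := ∀ (starting_index : Int) (array : List Int), Dom_find_value_as_index starting_index array → Pre_find_value_as_index starting_index array → Spec_find_value_as_index starting_index array (find_value_as_index starting_index array)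

-- ===== LEMMAS AND PROOFS =====

-- Invariant: running A on the slice array[lo:hi] is running B's loop with
-- pointers (lo, hi) on the original array, fuel consumed in lockstep.
theorem fvai_slice (array : List Int) :
    ∀ fuel s lo hi, hi - lo ≤ fuel → lo < hi → hi ≤ array.length →
      fvaiRec fuel s ((array.drop lo).take (hi - lo)) = fvaiLoop fuel array s lo hi := by
  intro fuel
  induction fuel with
  | zero => intro s lo hi hk hlt _; omega
  | succ fuel ih =>
    intro s lo hi hk hlt hle
    have hlen : ((array.drop lo).take (hi - lo)).length = hi - lo := by
      simp [List.length_take, List.length_drop]; omega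
    rw [fvaiRec, fvaiLoop]
    by_cases h1 : hi - lo ≤ 1
    · have h1' : hi - lo = 1 := by omega
      rw [if_pos h1, if_pos (by rw [hlen]; omega)]
      obtain ⟨a, hL⟩ := List.length_eq_one_iff.mp (hlen.trans h1')
      rw [hL, PySem.List.pyGet?_zero_cons]
      have e0 : array[lo]? = some a := by
        have h := List.getElem?_take_of_lt (l := array.drop lo) (j := hi - lo)
          (by omega : 0 < hi - lo)
        rw [hL] at h
        simpa [List.getElem?_drop] using h.symm
      simp [PySem.List.pyGet?_natCast, e0]
    · rw [if_neg (by rw [hlen]; omega), if_neg (by rw [hlen]; omega), if_neg h1]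
      simp only [hlen]
      have hmlt : (hi - lo) / 2 < hi - lo := by omega
      have em : ((array.drop lo).take (hi - lo))[(hi - lo) / 2]? = array[lo + (hi - lo) / 2]? := by
        rw [List.getElem?_take_of_lt hmlt, List.getElem?_drop]
      simp only [PySem.List.pyGet?_natCast, em]
      split_ifs with c1 c2
      · -- discard first half: recurse on array[middle:] ~ pointers (lo+m, hi)
        rw [PySem.List.slice_from_natCast, List.drop_take, List.drop_drop]
        have harg : hi - lo - (hi - lo) / 2 = hi - (lo + (hi - lo) / 2) := by omega
        rw [harg]
        exact ih _ _ _ (by omega) (by omega) hle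
      · rfl
      · -- discard second half: recurse on array[:middle] ~ pointers (lo, lo+m)
        rw [PySem.List.slice_to_natCast, List.take_take,
          min_eq_left (by omega : (hi - lo) / 2 ≤ hi - lo)]
        have H := ih (s + (((hi - lo) / 2 : ℕ) : ℤ)) lo (lo + (hi - lo) / 2)
          (by omega) (by omega) (by omega)
        rw [show lo + (hi - lo) / 2 - lo = (hi - lo) / 2 from by omega] at H
        exact H

-- ===== VERDICT (by name: the statement is the Claim_ definition above) =====
theorem find_value_as_index_spec : Claim_equal_find_value_as_index := by
  intro s array _ hpre
  unfold Spec_find_value_as_index find_value_as_index find_value_as_index_alt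
  have hlen : 0 < array.length := List.length_pos_of_ne_nil hpre
  have := fvai_slice array array.length s 0 array.length (by omega) hlen (le_refl _)
  simpa using this
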